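-- pv_equiv track=rewrite | github.com/ktazi/BugDestructor | parser/file_sashimi.py | sashimi_char
-- ===== SOURCE A (Python) =====
-- def sashimi_char(st,c):
--     tab = []
--     it = 0
--     a = 0
--     if st == '' :
--         return []
--     while a<len(st) and st[a] == c :
--         it += 1
--         tab.append(c)
--         a +=1
--     if a < len(st) :
--         tab.append(st[a])
--     a+=1
--     for i in st[a:] :
--         if i==c :
--             it += 2
--             tab.append(c)
--             if a != len(st) - 1:
--                 tab.append('')
--         else :
--             tab[it] = tab[it] + i
--         a += 1
--     return tab
-- ===== SOURCE B (Python) =====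
-- def sashimi_char(st, c):
--     if st == '':
--         return []
--     if len(c) != 1:
--         # A compares single characters against c, so a non-1-char c never matches
--         return [st]
--     L = 0
--     while L < len(st) and st[L] == c:
--         L += 1
--     res = [c] * L
--     body = st[L:]
--     if body == '':
--         return res
--     toks = body.split(c)
--     res.append(toks[0])
--     for t in toks[1:]:
--         res.append(c)
--         res.append(t)
--     if toks[-1] == '':
--         res.pop()
--     return res
-- ===== Notes on version B (the rewrite author's own statement) =====
-- stated objective: faster
-- what changed: B replaces A's index-mutating accumulation loop (tab[it] rebuilt by per-character string concatenation) by counting the leading separator run and then using str.split on the rest, interleaving the separator between tokens and dropping the trailing empty token.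
import Mathlib
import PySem

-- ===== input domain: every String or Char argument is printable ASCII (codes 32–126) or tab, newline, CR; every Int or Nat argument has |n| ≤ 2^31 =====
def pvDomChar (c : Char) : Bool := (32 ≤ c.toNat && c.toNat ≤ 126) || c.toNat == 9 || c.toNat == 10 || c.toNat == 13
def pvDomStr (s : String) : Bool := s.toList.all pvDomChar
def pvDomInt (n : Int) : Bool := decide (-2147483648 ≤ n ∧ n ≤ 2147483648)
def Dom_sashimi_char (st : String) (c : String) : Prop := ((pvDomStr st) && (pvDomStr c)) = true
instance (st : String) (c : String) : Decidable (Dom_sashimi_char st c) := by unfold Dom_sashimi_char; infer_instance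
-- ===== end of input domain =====

-- B replaces A's index-mutating accumulation loop by a leading-run count plus str.split with
-- interleaved separators (objective: faster, measured); the equivalence
-- proved here is about the return value only.


-- ===== PORT A =====
-- the leading 'while a<len(st) and st[a]==c' loop; returns (tab, it, a, remaining characters)
def pvAWhile (cs : List Char) (c : String) (tab : List String) (it : Nat) (a : Int) :
    List String × Nat × Int × List Char :=
  match cs with
  | [] => (tab, it, a, [])
  | x :: rest =>
    if String.singleton x == c then pvAWhile rest c (tab ++ [c]) (it + 1) (a + 1)
    else (tab, it, a, x :: rest)

-- the 'for i in st[a:]' loop; 'it' is Python's nonnegative index into tab (tab[it] = tab[it] + i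
-- becomes List.set / List.getD; the index is in range whenever A reads it, so no exception arises)
def pvALoop (cs : List Char) (c : String) (tab : List String) (it : Nat) (a : Int) (n : Int) :
    List String :=
  match cs with
  | [] => tab
  | i :: rest =>
    if String.singleton i == c then
      let tab1 := tab ++ [c]
      let tab2 := if a ≠ n - 1 then tab1 ++ [""] else tab1
      pvALoop rest c tab2 (it + 2) (a + 1) n
    else
      pvALoop rest c (tab.set it (tab.getD it "" ++ String.singleton i)) it (a + 1) n

def sashimi_char (st : String) (c : String) : List String :=
  if st == "" then []
  else
    match pvAWhile st.toList c [] 0 0 with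
    | (tab, _, _, []) => tab   -- 'if a < len(st)' is false; the final for loop runs over ''
    | (tab, it, a, x :: rest) =>
        pvALoop rest c (tab ++ [String.singleton x]) it (a + 1) (st.toList.length : Int)

-- ===== PORT B =====
-- the 'while L < len(st) and st[L] == c' counting loop of Source B
def pvBLead (cs : List Char) (c : String) : Nat :=
  match cs with
  | [] => 0
  | x :: rest => if String.singleton x == c then pvBLead rest c + 1 else 0

def sashimi_char_alt (st : String) (c : String) : List String :=
  if st == "" then []
  else if PySem.Str.len c ≠ 1 then [st]
  else
    let L := pvBLead st.toList c
    let res := List.replicate L c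
    let body := st.toList.drop L
    if body = [] then res
    else
      -- body.split(c); c has length 1 here, so Python's split does not raise
      let toks := (PySem.Chars.splitOn body c.toList).map String.ofList
      match toks with
      | [] => res   -- unreachable: splitOn never returns []
      | t0 :: rest =>
        let out := res ++ [t0] ++ rest.flatMap (fun t => [c, t])
        if toks.getLast? = some "" then out.dropLast else out

-- ===== PRECONDITION & SPEC =====
def Spec_sashimi_char (st : String) (c : String) (out : List String) : Prop := out = sashimi_char_alt st c
instance (st : String) (c : String) (out : List String) : Decidable (Spec_sashimi_char st c out) := by unfold Spec_sashimi_char; infer_instance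

-- ===== CLAIM (what is proved, stated in full; the proofs are below) =====
def Claim_equal_sashimi_char : Prop := ∀ (st : String) (c : String), Dom_sashimi_char st c → Spec_sashimi_char st c (sashimi_char st c)

-- ===== LEMMAS AND PROOFS =====

-- the groups obtained by splitting on the single character ch (Python's str.split semantics)
def pvGroups (ch : Char) : List Char → List (List Char)
  | [] => [[]]
  | x :: rest =>
    if x = ch then [] :: pvGroups ch rest
    else match pvGroups ch rest with
         | [] => [[x]]
         | g :: gs => (x :: g) :: gs

-- what A's for-loop appends after the first group: ', g' for each later group, except that a
-- trailing empty group contributes only the separator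
def pvGlueTail (c : String) : List (List Char) → List String
  | [] => []
  | [g] => if g = [] then [c] else [c, String.ofList g]
  | g :: g' :: gs => c :: String.ofList g :: pvGlueTail c (g' :: gs)

theorem pvGroups_ne_nil (ch : Char) (l : List Char) : pvGroups ch l ≠ [] := by
  induction l with
  | nil => simp [pvGroups]
  | cons x rest ih =>
    simp only [pvGroups]
    split
    · simp
    · split <;> simp_all

theorem pvGroups_singleton (ch : Char) (l g : List Char) (h : pvGroups ch l = [g]) : g = l := by
  induction l generalizing g with
  | nil => simp [pvGroups] at h; exact h
  | cons x rest ih =>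
    simp only [pvGroups] at h
    split at h
    · exfalso
      have := pvGroups_ne_nil ch rest
      cases hr : pvGroups ch rest <;> simp_all
    · rename_i hx
      split at h
      · exact absurd ‹pvGroups ch rest = []› (pvGroups_ne_nil ch rest)
      · rename_i g0 gs hr
        obtain ⟨h1, h2⟩ := List.cons.injEq .. ▸ h
        subst h2
        have := ih g0 hr
        simp [← h1, this]

theorem pvSplitOn_go_eq (ch : Char) (fuel : Nat) (l cur : List Char) (acc : List (List Char))
    (h : l.length < fuel) :
    PySem.Chars.splitOn.go [ch] fuel l cur acc =
      acc.reverse ++ (match pvGroups ch l with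
                      | [] => [cur.reverse]
                      | g :: gs => (cur.reverse ++ g) :: gs) := by
  induction fuel generalizing l cur acc with
  | zero => omega
  | succ fuel ih =>
    cases l with
    | nil => simp [PySem.Chars.splitOn.go, pvGroups]
    | cons x rest =>
      rw [PySem.Chars.splitOn.go]
      by_cases hx : x = ch
      · subst hx
        have hp : ([x].isPrefixOf (x :: rest)) = true := by simp [List.isPrefixOf]
        rw [if_pos hp]
        simp only [List.length_singleton, List.drop_one, List.tail_cons]
        rw [ih rest [] (cur.reverse :: acc) (by simpa using Nat.lt_of_succ_lt_succ (by simpa using h))]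
        simp only [pvGroups]
        cases hr : pvGroups x rest with
        | nil => exact absurd hr (pvGroups_ne_nil x rest)
        | cons g gs => simp
      · have hp : ([ch].isPrefixOf (x :: rest)) = false := by
          simp [List.isPrefixOf]; exact fun hxe => absurd hxe.symm hx
        rw [if_neg (by simp [hp])]
        rw [ih rest (x :: cur) acc (by simpa using Nat.lt_of_succ_lt_succ (by simpa using h))]
        simp only [pvGroups, if_neg hx]
        cases hr : pvGroups ch rest with
        | nil => exact absurd hr (pvGroups_ne_nil ch rest)
        | cons g gs => simp

theorem pvSplitOn_singleton (ch : Char) (l : List Char) :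
    PySem.Chars.splitOn l [ch] = pvGroups ch l := by
  rw [PySem.Chars.splitOn, pvSplitOn_go_eq ch (l.length + 1) l [] [] (by omega)]
  cases hr : pvGroups ch l with
  | nil => exact absurd hr (pvGroups_ne_nil ch l)
  | cons g gs => simp

theorem pvAWhile_eq (c : String) (cs : List Char) (tab : List String) (it : Nat) (a : Int) :
    pvAWhile cs c tab it a =
      (tab ++ List.replicate (cs.takeWhile (fun x => String.singleton x == c)).length c,
       it + (cs.takeWhile (fun x => String.singleton x == c)).length,
       a + (cs.takeWhile (fun x => String.singleton x == c)).length,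
       cs.dropWhile (fun x => String.singleton x == c)) := by
  induction cs generalizing tab it a with
  | nil => simp [pvAWhile]
  | cons x rest ih =>
    simp only [pvAWhile, List.takeWhile_cons, List.dropWhile_cons]
    by_cases hx : (String.singleton x == c) = true
    · rw [if_pos hx, ih]
      simp only [hx, if_true, List.length_cons, List.replicate_succ, List.append_assoc,
        List.singleton_append, Prod.mk.injEq]
      refine ⟨trivial, by omega, by omega, trivial⟩
    · rw [if_neg hx]
      simp [Bool.of_not_eq_true hx]

theorem pvBLead_eq (c : String) (cs : List Char) :
    pvBLead cs c = (cs.takeWhile (fun x => String.singleton x == c)).length := by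
  induction cs with
  | nil => simp [pvBLead]
  | cons x rest ih =>
    simp only [pvBLead, List.takeWhile_cons]
    by_cases hx : (String.singleton x == c) = true
    · simp [hx, ih]
    · simp [Bool.of_not_eq_true hx]

theorem pvSet_last (pre : List String) (t v : String) :
    (pre ++ [t]).set pre.length v = pre ++ [v] := by
  induction pre with
  | nil => simp
  | cons p ps ih => simp [ih]

theorem pvGetD_last (pre : List String) (t : String) :
    (pre ++ [t]).getD pre.length "" = t := by
  simp

theorem pvSingleton_beq (x : Char) (ch : Char) :
    (String.singleton x == String.singleton ch) = (x == ch) := by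
  simp [String.singleton]

theorem pvALoop_nomatch (c : String) (cs : List Char) (pre : List String) (t : String)
    (a n : Int) (h : ∀ i ∈ cs, (String.singleton i == c) = false) :
    pvALoop cs c (pre ++ [t]) pre.length a n = pre ++ [t ++ String.ofList cs] := by
  induction cs generalizing t a with
  | nil => simp [pvALoop]
  | cons i rest ih =>
    have hi := h i (by simp)
    simp only [pvALoop, hi, Bool.false_eq_true, reduceIte]
    rw [pvGetD_last, pvSet_last]
    rw [ih (t ++ String.singleton i) (a + 1) (fun j hj => h j (by simp [hj]))]
    have : t ++ String.singleton i ++ String.ofList rest = t ++ String.ofList (i :: rest) := by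
      apply String.toList_inj.mp
      simp [String.singleton]
    rw [this]

theorem pvGlueTail_cons (c : String) (g0 : List Char) (gs0 : List (List Char))
    (h : gs0 = [] → g0 ≠ []) :
    pvGlueTail c (g0 :: gs0) = c :: String.ofList g0 :: pvGlueTail c gs0 := by
  cases gs0 with
  | nil => simp [pvGlueTail, h rfl]
  | cons g' gs' => rfl

theorem pvALoop_spec (c : String) (ch : Char) (hc : c = String.singleton ch)
    (cs : List Char) (pre : List String) (t : String) (a n : Int)
    (hn : a + cs.length = n) :
    pvALoop cs c (pre ++ [t]) pre.length a n =
      pre ++ (match pvGroups ch cs with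
              | [] => [t]
              | g :: gs => (t ++ String.ofList g) :: pvGlueTail c gs) := by
  induction cs generalizing pre t a with
  | nil => simp [pvALoop, pvGroups, pvGlueTail]
  | cons i rest ih =>
    subst hc
    by_cases hi : i = ch
    · subst hi
      simp only [pvALoop, BEq.rfl, if_pos]
      cases rest with
      | nil =>
        -- i is the last character: a = n - 1, no '' appended
        have ha : a = n - 1 := by simp at hn; omega
        simp only [ha, ne_eq, not_true_eq_false, reduceIte]
        simp [pvALoop, pvGroups, pvGlueTail]
      | cons r rest' =>
        have ha : a ≠ n - 1 := by simp at hn; omega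
        simp only [ha, ne_eq, not_false_eq_true, reduceIte]
        have hIH := ih (pre ++ [t, String.singleton i]) "" (a + 1)
          (by simp at hn ⊢; omega)
        simp only [List.append_assoc, List.cons_append, List.nil_append,
          List.length_append, List.length_cons, List.length_nil] at hIH ⊢
        rw [hIH]
        have hg : pvGroups i (i :: r :: rest') = [] :: pvGroups i (r :: rest') := by
          simp [pvGroups]
        cases hr : pvGroups i (r :: rest') with
        | nil => exact absurd hr (pvGroups_ne_nil i (r :: rest'))
        | cons g0 gs0 =>
          have hg0 : gs0 = [] → g0 ≠ [] := by
            intro hgs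
            have : g0 = r :: rest' := pvGroups_singleton i (r :: rest') g0 (by rw [hr, hgs])
            simp [this]
          rw [hg, hr]
          simp [pvGlueTail_cons _ _ _ hg0]
    · -- i ≠ ch
      simp only [pvALoop, pvSingleton_beq]
      rw [if_neg (by simp [hi])]
      rw [pvGetD_last, pvSet_last]
      rw [ih pre (t ++ String.singleton i) (a+1) (by simp at hn ⊢; omega)]
      simp only [pvGroups, if_neg hi]
      cases hr : pvGroups ch rest with
      | nil => exact absurd hr (pvGroups_ne_nil ch rest)
      | cons g gs =>
        have heq : t.push i ++ String.ofList g = t ++ String.ofList (i :: g) := by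
          apply String.toList_inj.mp
          simp
        simp [heq]

theorem pvGlueTail_flat (c : String) (gs : List (List Char)) :
    pvGlueTail c gs =
      if gs.getLast? = some [] then (gs.flatMap (fun g => [c, String.ofList g])).dropLast
      else gs.flatMap (fun g => [c, String.ofList g]) := by
  induction gs with
  | nil => simp [pvGlueTail]
  | cons g gs ih =>
    cases gs with
    | nil =>
      by_cases hg : g = []
      · subst hg; simp [pvGlueTail]
      · simp [pvGlueTail, hg]
    | cons g' gs' =>
      have hne : (g' :: gs').flatMap (fun g => [c, String.ofList g]) ≠ [] := by
        simp [List.flatMap_cons]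
      rw [pvGlueTail, ih]
      rw [show (g :: g' :: gs').getLast? = (g' :: gs').getLast? from by
        simp [List.getLast?_cons_cons]]
      by_cases hl : (g' :: gs').getLast? = some []
      · rw [if_pos hl, if_pos hl]
        conv_rhs => rw [List.flatMap_cons, List.dropLast_append]
        simp
      · rw [if_neg hl, if_neg hl]
        simp [List.flatMap_cons]

-- ===== VERDICT (by name: the statement is the Claim_ definition above) =====
theorem pvNomatch_of_len (c : String) (hc : c.toList.length ≠ 1) (x : Char) :
    (String.singleton x == c) = false := by
  rw [beq_eq_false_iff_ne]
  intro he
  apply hc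
  rw [← he]
  simp [String.singleton]

theorem sashimi_char_spec : Claim_equal_sashimi_char := by
  unfold Claim_equal_sashimi_char
  intro st c _
  unfold Spec_sashimi_char sashimi_char sashimi_char_alt
  by_cases hst : (st == "") = true
  · simp [hst]
  · rw [if_neg hst, if_neg hst]
    have hstl : st.toList ≠ [] := by
      intro h
      have : st = "" := String.toList_inj.mp (by simpa using h)
      simp [this] at hst
    by_cases hc1 : c.toList.length = 1
    · -- c is a single character ch
      obtain ⟨ch, hch⟩ : ∃ ch, c.toList = [ch] := by
        cases h : c.toList with
        | nil => simp [h] at hc1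
        | cons ach l =>
          cases l with
          | nil => exact ⟨ach, rfl⟩
          | cons b l' => simp [h] at hc1
      have hc : c = String.singleton ch := String.toList_inj.mp (by simp [String.singleton, hch])
      rw [if_neg (show ¬ PySem.Str.len c ≠ 1 by simp [PySem.Str.len, hch])]
      rw [pvAWhile_eq, pvBLead_eq]
      dsimp only
      have hdrop : ∀ (l : List Char) (p : Char → Bool),
          l.drop (l.takeWhile p).length = l.dropWhile p := by
        intro l p
        induction l with
        | nil => simp
        | cons y ys ih =>
          by_cases h : p y
          · simp [h, ih]
          · simp [h]
      rw [hdrop]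
      cases hb : st.toList.dropWhile (fun x => String.singleton x == c) with
      | nil => simp
      | cons x rest =>
        have hpx : (String.singleton x == c) = false := by
          have := List.head?_dropWhile_not (fun x => String.singleton x == c) st.toList
          rw [hb] at this
          simpa using this
        have hxch : x ≠ ch := by
          intro h
          rw [hc, h, pvSingleton_beq] at hpx
          simp at hpx
        have hlen : ((0 : Int) + (st.toList.takeWhile (fun x => String.singleton x == c)).length) + 1
            + rest.length = (st.toList.length : Int) := by
          have := congrArg List.length
            (List.takeWhile_append_dropWhile (p := fun x => String.singleton x == c) (l := st.toList))
          rw [hb] at this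
          simp only [List.length_append, List.length_cons] at this
          omega
        have hA := pvALoop_spec c ch hc rest
          (List.replicate (st.toList.takeWhile (fun x => String.singleton x == c)).length c)
          (String.singleton x) _ _ hlen
        simp only [List.length_replicate] at hA
        simp only [List.nil_append, Nat.zero_add]
        rw [hA]
        rw [if_neg (show ¬(x :: rest) = ([] : List Char) by simp)]
        rw [hch, pvSplitOn_singleton]
        have hgx : pvGroups ch (x :: rest) =
            match pvGroups ch rest with
            | [] => [[x]]
            | g :: gs => (x :: g) :: gs := by
          simp [pvGroups, hxch]
        rw [hgx]
        cases hr : pvGroups ch rest with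
        | nil => exact absurd hr (pvGroups_ne_nil ch rest)
        | cons g0 gs0 =>
          simp only [List.map_cons]
          have hhead : String.singleton x ++ String.ofList g0 = String.ofList (x :: g0) := by
            apply String.toList_inj.mp
            simp [String.singleton]
          have ht0 : String.ofList (x :: g0) ≠ "" := by
            intro h
            have := congrArg String.toList h
            simp at this
          rw [pvGlueTail_flat]
          cases gs0 with
          | nil => simp [ht0, hhead]
          | cons h0 tl0 =>
            have hflat : ((h0 :: tl0).map String.ofList).flatMap (fun t => [c, t])
                = (h0 :: tl0).flatMap (fun g => [c, String.ofList g]) := by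
              simp [List.flatMap_map]
            have hlastmap : (String.ofList (x :: g0) :: (h0 :: tl0).map String.ofList).getLast?
                = ((h0 :: tl0).getLast?).map String.ofList := by
              rw [← List.map_cons, List.getLast?_map, List.getLast?_cons_cons]
            simp only [hlastmap]
            by_cases hl : (h0 :: tl0).getLast? = some []
            · rw [if_pos hl]
              rw [if_pos (by rw [hl]; simp)]
              rw [hflat]
              have hXne : (h0 :: tl0).flatMap (fun g => [c, String.ofList g]) ≠ [] := by
                simp [List.flatMap_cons]
              rw [List.dropLast_append, List.dropLast_append]
              simp [hhead]
            · rw [if_neg hl]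
              rw [if_neg (by
                intro h
                apply hl
                cases hq : (h0 :: tl0).getLast? with
                | none => simp [hq] at h
                | some g =>
                  rw [hq] at h
                  simp only [Option.map_some, Option.some.injEq] at h
                  have := congrArg String.toList h
                  simpa [hq] using this)]
              rw [hflat]
              simp [hhead]
    · -- c is not a single character: A never matches it, B returns [st]
      have hp : ∀ x, (String.singleton x == c) = false := pvNomatch_of_len c hc1
      have hT : st.toList.takeWhile (fun x => String.singleton x == c) = [] := by
        cases h : st.toList with
        | nil => simp
        | cons x xs => simp [hp x]
      have hD : st.toList.dropWhile (fun x => String.singleton x == c) = st.toList := by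
        cases h : st.toList with
        | nil => simp
        | cons x xs => simp [hp x]
      rw [pvAWhile_eq, hT, hD]
      rw [if_pos (show PySem.Str.len c ≠ 1 by simp only [PySem.Str.len]; omega)]
      cases hl : st.toList with
      | nil => exact absurd hl hstl
      | cons x rest =>
        simp only [List.length_nil, List.replicate_zero, List.append_nil, List.nil_append,
          Nat.add_zero, Nat.cast_zero]
        have h2 := pvALoop_nomatch c rest [] (String.singleton x) (0 + (0:Int) + 1)
          ((x :: rest).length : Int) (fun j _ => hp j)
        simp only [List.nil_append, List.length_nil] at h2
        rw [h2]
        have : String.singleton x ++ String.ofList rest = st := by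
          apply String.toList_inj.mp
          simp [String.singleton, hl]
        rw [this]
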